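-- pv_equiv track=rewrite | github.com/israelbolvr/O-jogo-Gemas | bibliotecaIsraelOliveira.py | validar_horizontal
-- ===== SOURCE A (Python) =====
-- def validar_horizontal(m, linhas, colunas): ### FUNÇÃO QUE VALIDA AS LINHAS DA MATRIZ
--     valido = False
--     for l in range(linhas):
--         contador = 1
--         for c in range(colunas - 1):
--             if (m[l][c]).lower() == (m[l][c + 1]).lower():
--                 contador += 1
--             else:
--                 contador = 1
--             if contador >= 3: ### SE TIVER 3 OU MAIS GEMAS JUNTAS
--                 valido = True
--
--     return valido
-- ===== SOURCE B (Python) =====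
-- def validar_horizontal(m, linhas, colunas):
--     # Window scan: any row with three consecutive case-insensitively equal cells.
--     return any(
--         m[l][c].lower() == m[l][c + 1].lower() == m[l][c + 2].lower()
--         for l in range(linhas)
--         for c in range(colunas - 2)
--     )
-- ===== Notes on version B (the rewrite author's own statement) =====
-- stated objective: simpler
-- what changed: Replaces the per-row running consecutive-run counter (contador) and valido flag with a stateless scan of fixed windows of three cells via any(), short-circuiting on the first match.
import Mathlib
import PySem

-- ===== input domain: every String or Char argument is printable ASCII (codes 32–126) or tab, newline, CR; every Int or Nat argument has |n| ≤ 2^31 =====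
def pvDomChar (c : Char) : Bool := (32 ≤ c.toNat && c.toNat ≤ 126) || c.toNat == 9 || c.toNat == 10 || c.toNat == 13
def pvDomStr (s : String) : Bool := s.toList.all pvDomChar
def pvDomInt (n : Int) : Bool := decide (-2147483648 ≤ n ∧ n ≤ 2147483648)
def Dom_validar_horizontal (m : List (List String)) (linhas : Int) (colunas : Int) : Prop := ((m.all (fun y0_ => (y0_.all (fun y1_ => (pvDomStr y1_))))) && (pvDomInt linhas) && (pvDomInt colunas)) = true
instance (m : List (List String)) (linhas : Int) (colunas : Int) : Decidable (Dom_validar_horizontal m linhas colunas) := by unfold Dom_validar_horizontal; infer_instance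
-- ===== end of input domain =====

-- B replaces A's per-row running counter with a stateless three-cell window scan (simpler decomposition, same cost).

-- ===== PORT A =====
def validar_horizontal (m : List (List String)) (linhas : Int) (colunas : Int) : Bool :=
  (PySem.List.pyRange 0 linhas 1).foldl
    (fun valido l =>
      ((PySem.List.pyRange 0 (colunas - 1) 1).foldl
        (fun (st : Int × Bool) c =>
          let contador : Int :=
            if PySem.Str.lower ((PySem.List.pyGet? ((PySem.List.pyGet? m l).getD []) c).getD "") =
               PySem.Str.lower ((PySem.List.pyGet? ((PySem.List.pyGet? m l).getD []) (c + 1)).getD "")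
            then st.1 + 1 else 1
          (contador, if 3 ≤ contador then true else st.2))
        (1, valido)).2)
    false

-- ===== PORT B =====
def validar_horizontal_alt (m : List (List String)) (linhas : Int) (colunas : Int) : Bool :=
  (PySem.List.pyRange 0 linhas 1).any fun l =>
    (PySem.List.pyRange 0 (colunas - 2) 1).any fun c =>
      (PySem.Str.lower ((PySem.List.pyGet? ((PySem.List.pyGet? m l).getD []) c).getD "") ==
       PySem.Str.lower ((PySem.List.pyGet? ((PySem.List.pyGet? m l).getD []) (c + 1)).getD "")) &&
      (PySem.Str.lower ((PySem.List.pyGet? ((PySem.List.pyGet? m l).getD []) (c + 1)).getD "") ==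
       PySem.Str.lower ((PySem.List.pyGet? ((PySem.List.pyGet? m l).getD []) (c + 2)).getD ""))

-- ===== PRECONDITION & SPEC =====
-- Pre_ excludes exactly the inputs where Python A raises IndexError: when colunas ≥ 2 it
-- indexes m[l] for every l < linhas and m[l][colunas-1], so it needs linhas ≤ len(m) and
-- every visited row at least colunas long (when colunas ≤ 1 the inner loop is empty and A is total).
def Pre_validar_horizontal (m : List (List String)) (linhas : Int) (colunas : Int) : Prop :=
  2 ≤ colunas → (linhas ≤ (m.length : Int) ∧ ∀ row ∈ m.take linhas.toNat, colunas ≤ (row.length : Int))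
instance (m : List (List String)) (linhas : Int) (colunas : Int) : Decidable (Pre_validar_horizontal m linhas colunas) := by unfold Pre_validar_horizontal; infer_instance

def pvWitness_validar_horizontal : List (List String) × Int × Int := ([["a", "A", "b"], ["x", "y", "z"]], 2, 3)

def Spec_validar_horizontal (m : List (List String)) (linhas : Int) (colunas : Int) (out : Bool) : Prop := out = validar_horizontal_alt m linhas colunas
instance (m : List (List String)) (linhas : Int) (colunas : Int) (out : Bool) : Decidable (Spec_validar_horizontal m linhas colunas out) := by unfold Spec_validar_horizontal; infer_instance

-- ===== CLAIM (what is proved, stated in full; the proofs are below) =====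
def Claim_equal_validar_horizontal : Prop := ∀ (m : List (List String)) (linhas : Int) (colunas : Int), Dom_validar_horizontal m linhas colunas → Pre_validar_horizontal m linhas colunas → Spec_validar_horizontal m linhas colunas (validar_horizontal m linhas colunas)

-- ===== LEMMAS AND PROOFS =====

-- run length of equal cells, as A's contador maintains it
def pvRun (e : Nat → Bool) : Nat → Int
  | 0 => 1
  | k + 1 => if e k then pvRun e k + 1 else 1

lemma pvRun_pos (e : Nat → Bool) (k : Nat) : 1 ≤ pvRun e k := by
  induction k with
  | zero => simp [pvRun]
  | succ k ih => simp only [pvRun]; split <;> omega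

lemma pvRun_ge3 (e : Nat → Bool) (j : Nat) :
    3 ≤ pvRun e (j + 1) ↔ ∃ c, j = c + 1 ∧ e c = true ∧ e (c + 1) = true := by
  cases j with
  | zero =>
    simp only [pvRun]
    constructor
    · intro h; split at h <;> omega
    · rintro ⟨c, hc, _⟩; omega
  | succ c =>
    constructor
    · intro h
      simp only [pvRun] at h
      by_cases h1 : e (c + 1)
      · by_cases h0 : e c
        · exact ⟨c, rfl, h0, h1⟩
        · rw [if_pos h1, if_neg h0] at h; omega
      · rw [if_neg h1] at h; omega
    · rintro ⟨c', hc, h0, h1⟩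
      obtain rfl : c = c' := by omega
      have := pvRun_pos e c
      simp only [pvRun, h0, h1, if_true]
      omega

-- A's inner loop: fold over range k yields (run length, flag ∨ some prefix run hit 3)
lemma pvInner (e : Nat → Bool) (k : Nat) (v : Bool) :
    (List.range k).foldl
      (fun (st : Int × Bool) j =>
        (if e j then st.1 + 1 else (1 : Int),
         if 3 ≤ (if e j then st.1 + 1 else (1 : Int)) then true else st.2)) (1, v)
    = (pvRun e k, v || (List.range k).any fun j => decide (3 ≤ pvRun e (j + 1))) := by
  induction k with
  | zero => simp [pvRun]
  | succ k ih =>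
    rw [List.range_succ, List.foldl_append, List.any_append, ih]
    simp only [List.foldl_cons, List.foldl_nil, List.any_cons, List.any_nil]
    have hrun : (if e k then pvRun e k + 1 else 1 : Int) = pvRun e (k + 1) := by
      simp [pvRun]
    rw [hrun]
    refine Prod.ext rfl ?_
    by_cases h3 : 3 ≤ pvRun e (k + 1) <;> simp [h3]

-- the run hits 3 somewhere below k iff some 3-window fits below k-1
lemma pvWin (e : Nat → Bool) (k : Nat) :
    ((List.range k).any fun j => decide (3 ≤ pvRun e (j + 1)))
    = ((List.range (k - 1)).any fun c => e c && e (c + 1)) := by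
  rw [Bool.eq_iff_iff]
  simp only [List.any_eq_true, List.mem_range, decide_eq_true_eq, Bool.and_eq_true, pvRun_ge3]
  constructor
  · rintro ⟨j, hj, c, rfl, h0, h1⟩
    exact ⟨c, by omega, h0, h1⟩
  · rintro ⟨c, hc, h0, h1⟩
    exact ⟨c + 1, by omega, c, rfl, h0, h1⟩

-- pvInner restated against a cell getter g over cast indices, with the window form on the right
lemma pvInner' (g : Int → String) (k : Nat) (v : Bool) :
    ((List.range k).foldl
      (fun (st : Int × Bool) (j : Nat) =>
        (if g (j : Int) = g ((j : Int) + 1) then st.1 + 1 else (1 : Int),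
         if 3 ≤ (if g (j : Int) = g ((j : Int) + 1) then st.1 + 1 else (1 : Int)) then true else st.2))
      (1, v)).2
    = (v || (List.range (k - 1)).any fun c : Nat =>
        (g (c : Int) == g ((c : Int) + 1)) && (g ((c : Int) + 1) == g ((c : Int) + 2))) := by
  have h := pvInner (fun j : Nat => g (j : Int) == g ((j : Int) + 1)) k v
  simp only [beq_iff_eq] at h
  rw [h, pvWin]
  congr 1

-- per-row equivalence between A's inner fold and B's inner any
lemma pvRow (m : List (List String)) (colunas l : Int) (v : Bool) :
    ((PySem.List.pyRange 0 (colunas - 1) 1).foldl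
      (fun (st : Int × Bool) c =>
        (if PySem.Str.lower ((PySem.List.pyGet? ((PySem.List.pyGet? m l).getD []) c).getD "") =
             PySem.Str.lower ((PySem.List.pyGet? ((PySem.List.pyGet? m l).getD []) (c + 1)).getD "")
         then st.1 + 1 else (1 : Int),
         if 3 ≤ (if PySem.Str.lower ((PySem.List.pyGet? ((PySem.List.pyGet? m l).getD []) c).getD "") =
             PySem.Str.lower ((PySem.List.pyGet? ((PySem.List.pyGet? m l).getD []) (c + 1)).getD "")
           then st.1 + 1 else (1 : Int)) then true else st.2))
      (1, v)).2
    = (v || (PySem.List.pyRange 0 (colunas - 2) 1).any fun c =>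
        (PySem.Str.lower ((PySem.List.pyGet? ((PySem.List.pyGet? m l).getD []) c).getD "") ==
         PySem.Str.lower ((PySem.List.pyGet? ((PySem.List.pyGet? m l).getD []) (c + 1)).getD "")) &&
        (PySem.Str.lower ((PySem.List.pyGet? ((PySem.List.pyGet? m l).getD []) (c + 1)).getD "") ==
         PySem.Str.lower ((PySem.List.pyGet? ((PySem.List.pyGet? m l).getD []) (c + 2)).getD ""))) := by
  rw [PySem.List.pyRange_one 0 (colunas - 1), PySem.List.pyRange_one 0 (colunas - 2),
    List.foldl_map, List.any_map]
  simp only [Function.comp_def, zero_add, sub_zero]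
  rw [pvInner' (fun i => PySem.Str.lower ((PySem.List.pyGet? ((PySem.List.pyGet? m l).getD []) i).getD ""))]
  have hk : (colunas - 1).toNat - 1 = (colunas - 2).toNat := by omega
  rw [hk]

-- A's outer loop as an or-fold over rows
lemma pvMain (m : List (List String)) (colunas : Int) (L : List Int) (v : Bool) :
    L.foldl
      (fun valido l =>
        ((PySem.List.pyRange 0 (colunas - 1) 1).foldl
          (fun (st : Int × Bool) c =>
            let contador : Int :=
              if PySem.Str.lower ((PySem.List.pyGet? ((PySem.List.pyGet? m l).getD []) c).getD "") =
                 PySem.Str.lower ((PySem.List.pyGet? ((PySem.List.pyGet? m l).getD []) (c + 1)).getD "")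
              then st.1 + 1 else 1
            (contador, if 3 ≤ contador then true else st.2))
          (1, valido)).2) v
    = (v || L.any fun l =>
        (PySem.List.pyRange 0 (colunas - 2) 1).any fun c =>
          (PySem.Str.lower ((PySem.List.pyGet? ((PySem.List.pyGet? m l).getD []) c).getD "") ==
           PySem.Str.lower ((PySem.List.pyGet? ((PySem.List.pyGet? m l).getD []) (c + 1)).getD "")) &&
          (PySem.Str.lower ((PySem.List.pyGet? ((PySem.List.pyGet? m l).getD []) (c + 1)).getD "") ==
           PySem.Str.lower ((PySem.List.pyGet? ((PySem.List.pyGet? m l).getD []) (c + 2)).getD ""))) := by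
  induction L generalizing v with
  | nil => simp
  | cons a t ih =>
    simp only [List.foldl_cons, List.any_cons]
    rw [pvRow m colunas a v, ih, Bool.or_assoc]

-- ===== VERDICT (by name: the statement is the Claim_ definition above) =====
theorem validar_horizontal_spec : Claim_equal_validar_horizontal := by
  intro m linhas colunas _ _
  unfold Spec_validar_horizontal validar_horizontal validar_horizontal_alt
  rw [pvMain m colunas (PySem.List.pyRange 0 linhas 1) false, Bool.false_or]
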